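-- pv_equiv track=rewrite | github.com/nannoda/lain-bot | modules/cogs/anime.py | limitLength
-- ===== SOURCE A (Python) =====
-- def limitLength(lst):
-- 	orgLen = len('\n'.join(lst))
-- 	if orgLen <= 1024:
-- 		return lst
--
-- 	lst.append('+#### others!')
-- 	tLen = len('\n'.join(lst))
-- 	lst = lst[:-1]
-- 	numRemoved = 0
-- 	lenRemoved = 0
-- 	for i in reversed(range(len(lst))):
-- 		lenRemoved += len(lst[i]) + 1
-- 		numRemoved += 1
-- 		del lst[i]
-- 		if tLen - lenRemoved <= 1024:
-- 			break
--
-- 	lst.append('+' + str(numRemoved) + ' others!')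
-- 	return lst
-- ===== SOURCE B (Python) =====
-- def limitLength(lst):
-- 	# Keep the longest prefix of the list that fits, together with a
-- 	# "+N others!" placeholder, into 1024 joined characters; the placeholder
-- 	# is budgeted at 13 characters.  The input list is not modified; note the
-- 	# original mutates its argument (appends a placeholder), this version does not.
-- 	if len('\n'.join(lst)) <= 1024:
-- 		return lst
-- 	budget = 1024 - 13
-- 	keep = 0
-- 	acc = 0
-- 	for e in lst[:-1]:
-- 		if acc + len(e) + 1 > budget:
-- 			break
-- 		acc += len(e) + 1
-- 		keep += 1
-- 	return lst[:keep] + ['+' + str(len(lst) - keep) + ' others!']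
-- ===== Notes on version B (the rewrite author's own statement) =====
-- stated objective: simpler
-- what changed: Replaces the reversed-range delete-one-at-a-time mutation loop with a forward greedy scan that finds the longest prefix fitting a fixed budget (1024 minus 13 for the placeholder) and builds the result by slicing; B does not mutate the caller's list (A appends a temporary placeholder to it), the equivalence is about the return value.
import Mathlib
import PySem

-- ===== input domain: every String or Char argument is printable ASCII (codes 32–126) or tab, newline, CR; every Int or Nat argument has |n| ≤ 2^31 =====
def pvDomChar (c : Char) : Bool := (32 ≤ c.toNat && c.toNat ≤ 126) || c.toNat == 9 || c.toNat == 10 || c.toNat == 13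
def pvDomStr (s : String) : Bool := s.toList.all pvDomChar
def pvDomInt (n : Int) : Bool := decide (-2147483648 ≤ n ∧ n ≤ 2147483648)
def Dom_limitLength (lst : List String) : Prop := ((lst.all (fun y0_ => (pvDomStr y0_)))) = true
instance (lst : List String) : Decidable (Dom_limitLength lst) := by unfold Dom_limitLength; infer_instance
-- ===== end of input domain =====

-- B uses a forward greedy prefix scan instead of A's reversed delete loop; A also mutates its
-- argument (appends a placeholder) while B does not — the equivalence proved is about the
-- RETURN value only.

-- ===== PORT A =====
-- A's loop 'for i in reversed(range(len(lst))): … del lst[i]' always deletes at index i of a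
-- list whose current length is i+1, i.e. it removes the current LAST element each iteration;
-- we model the list from the end by recursing over its reverse (exact, step for step).
def pvDelLoop (rev : List String) (tLen numRemoved lenRemoved : Int) : List String × Int :=
  match rev with
  | [] => ([], numRemoved)
  | x :: rest =>
    let lenRemoved := lenRemoved + PySem.Str.len x + 1
    let numRemoved := numRemoved + 1
    if tLen - lenRemoved ≤ 1024 then (rest.reverse, numRemoved)
    else pvDelLoop rest tLen numRemoved lenRemoved

def limitLength (lst : List String) : List String :=
  let orgLen := PySem.Str.len (PySem.Str.join "\n" lst)
  if orgLen ≤ 1024 then lst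
  else
    let lst1 := lst ++ ["+#### others!"]
    let tLen := PySem.Str.len (PySem.Str.join "\n" lst1)
    let lst2 := PySem.List.slice lst1 none (some (-1))
    let r := pvDelLoop lst2.reverse tLen 0 0
    r.1 ++ ["+" ++ PySem.Int.toStr r.2 ++ " others!"]

-- ===== PORT B =====
-- Source B's forward scan: longest prefix of lst[:-1] whose accumulated cost stays within budget.
def pvKeepCount (xs : List String) (budget acc : Int) : Int :=
  match xs with
  | [] => 0
  | e :: rest =>
    if acc + PySem.Str.len e + 1 > budget then 0
    else 1 + pvKeepCount rest budget (acc + PySem.Str.len e + 1)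

def limitLength_alt (lst : List String) : List String :=
  if PySem.Str.len (PySem.Str.join "\n" lst) ≤ 1024 then lst
  else
    let budget : Int := 1024 - 13
    let keep := pvKeepCount (PySem.List.slice lst none (some (-1))) budget 0
    PySem.List.slice lst none (some keep)
      ++ ["+" ++ PySem.Int.toStr ((lst.length : Int) - keep) ++ " others!"]

-- ===== PRECONDITION & SPEC =====
def Spec_limitLength (lst : List String) (out : List String) : Prop := out = limitLength_alt lst
instance (lst : List String) (out : List String) : Decidable (Spec_limitLength lst out) := by unfold Spec_limitLength; infer_instance

-- ===== CLAIM (what is proved, stated in full; the proofs are below) =====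
def Claim_equal_limitLength : Prop := ∀ (lst : List String), Dom_limitLength lst → Spec_limitLength lst (limitLength lst)

-- ===== LEMMAS AND PROOFS =====

-- cost of one element inside a '\n'-join: its length plus one separator
def pvCost (s : String) : Int := PySem.Str.len s + 1

-- longest prefix of a cost list whose sum stays ≤ b
def pvCnt (b : Int) : List Int → Nat
  | [] => 0
  | c :: t => if c ≤ b then pvCnt (b - c) t + 1 else 0

theorem pvCost_pos (s : String) : 1 ≤ pvCost s := by
  simp [pvCost]

theorem sum_pos_nonneg (l : List Int) (h : ∀ x ∈ l, 1 ≤ x) : 0 ≤ l.sum := by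
  induction l with
  | nil => simp
  | cons a t ih =>
    have ha := h a (by simp)
    have ht := ih (fun x hx => h x (by simp [hx]))
    simp [List.sum_cons]; omega

theorem sum_take_nonneg (c : List Int) (h : ∀ x ∈ c, 1 ≤ x) (k : Nat) :
    0 ≤ (c.take k).sum :=
  sum_pos_nonneg _ (fun x hx => h x (List.mem_of_mem_take hx))

theorem pvCnt_le_length (b : Int) (c : List Int) : pvCnt b c ≤ c.length := by
  induction c generalizing b with
  | nil => simp [pvCnt]
  | cons x t ih =>
    simp only [pvCnt]
    split
    · have := ih (b - x); simp; omega
    · simp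

theorem pvCnt_sum_le (b : Int) (c : List Int) (hb : 0 ≤ b) :
    (c.take (pvCnt b c)).sum ≤ b := by
  induction c generalizing b with
  | nil => simpa [pvCnt]
  | cons x t ih =>
    simp only [pvCnt]
    split
    · rename_i hx
      have := ih (b - x) (by omega)
      simp [List.sum_cons]
      omega
    · simpa

theorem pvCnt_succ_gt (b : Int) (c : List Int) :
    pvCnt b c = c.length ∨ b < (c.take (pvCnt b c + 1)).sum := by
  induction c generalizing b with
  | nil => left; simp [pvCnt]
  | cons x t ih =>
    simp only [pvCnt]
    split
    · rename_i hx
      rcases ih (b - x) with h | h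
      · left; simp [h]
      · right; simp [List.sum_cons]; omega
    · rename_i hx
      right; simp; omega

theorem pvCnt_eq (c : List Int) (b : Int) (k : Nat) (h1 : ∀ x ∈ c, 1 ≤ x)
    (hkn : k ≤ c.length) (hle : (c.take k).sum ≤ b)
    (hgt : k = c.length ∨ b < (c.take (k + 1)).sum) :
    pvCnt b c = k := by
  induction c generalizing b k with
  | nil => simp_all [pvCnt]
  | cons x t ih =>
    have hx1 : 1 ≤ x := h1 x (by simp)
    cases k with
    | zero =>
      rcases hgt with h | h
      · simp at h
      · simp only [List.take_succ_cons, List.take_zero, List.sum_cons, List.sum_nil] at h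
        simp only [pvCnt]
        rw [if_neg (by omega)]
    | succ k' =>
      simp only [List.take_succ_cons, List.sum_cons] at hle hgt
      have hst : 0 ≤ (t.take k').sum :=
        sum_take_nonneg t (fun y hy => h1 y (by simp [hy])) k'
      simp only [pvCnt]
      rw [if_pos (by omega)]
      have := ih (b - x) k' (fun y hy => h1 y (by simp [hy]))
        (by simpa using hkn) (by omega)
        (by rcases hgt with h | h
            · left; simpa using h
            · right; omega)
      omega

-- B's scan computes pvCnt of the cost list
theorem pvKeepCount_eq (xs : List String) (budget acc : Int) :
    pvKeepCount xs budget acc = ((pvCnt (budget - acc) (xs.map pvCost) : Nat) : Int) := by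
  induction xs generalizing acc with
  | nil => simp [pvKeepCount, pvCnt]
  | cons e rest ih =>
    simp only [pvKeepCount, List.map_cons, pvCnt]
    by_cases h : acc + PySem.Str.len e + 1 > budget
    · rw [if_pos h, if_neg (by simp only [pvCost]; omega)]
      simp
    · rw [if_neg h, if_pos (by simp only [pvCost]; omega)]
      rw [ih]
      have : budget - (acc + PySem.Str.len e + 1) = budget - acc - pvCost e := by
        simp only [pvCost]; omega
      rw [this]
      push_cast
      ring

-- A's delete loop removes min (pvCnt (tLen - lR - 1025) costs + 1) n leading elements of rev
theorem pvDelLoop_eq (rev : List String) (tLen nR lR : Int) :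
    pvDelLoop rev tLen nR lR =
      ((rev.drop (min (pvCnt (tLen - lR - 1025) (rev.map pvCost) + 1) rev.length)).reverse,
        nR + (min (pvCnt (tLen - lR - 1025) (rev.map pvCost) + 1) rev.length : Nat)) := by
  induction rev generalizing nR lR with
  | nil => simp [pvDelLoop, pvCnt]
  | cons x rest ih =>
    simp only [pvDelLoop, List.map_cons, pvCnt]
    by_cases h : tLen - (lR + PySem.Str.len x + 1) ≤ 1024
    · rw [if_pos h]
      have hc : ¬ pvCost x ≤ tLen - lR - 1025 := by simp only [pvCost]; omega
      rw [if_neg hc]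
      simp
    · rw [if_neg h]
      have hc : pvCost x ≤ tLen - lR - 1025 := by simp only [pvCost]; omega
      rw [if_pos hc]
      rw [ih (nR + 1) (lR + PySem.Str.len x + 1)]
      have harg : tLen - (lR + PySem.Str.len x + 1) - 1025 = tLen - lR - 1025 - pvCost x := by
        simp only [pvCost]; omega
      rw [harg]
      set d := pvCnt (tLen - lR - 1025 - pvCost x) (rest.map pvCost) with hd
      have hdl : d ≤ rest.length := by
        have := pvCnt_le_length (tLen - lR - 1025 - pvCost x) (rest.map pvCost)
        simpa [hd] using this
      have hmin : min (d + 1 + 1) (rest.length + 1) = min (d + 1) rest.length + 1 := by omega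
      simp only [List.length_cons]
      rw [hmin, List.drop_succ_cons]
      refine congrArg₂ Prod.mk rfl ?_
      push_cast; ring

-- length of a '\n'-join: sum of per-element costs minus one (nonempty list)
theorem join_len (l : List String) (hne : l ≠ []) :
    PySem.Str.len (PySem.Str.join "\n" l) = (l.map pvCost).sum - 1 := by
  induction l with
  | nil => simp at hne
  | cons a t ih =>
    cases t with
    | nil =>
      simp [PySem.Str.len_eq, PySem.Str.join, PySem.Chars.join_singleton, pvCost]
    | cons b t' =>
      have hj : (PySem.Str.join "\n" (a :: b :: t')).toList
          = a.toList ++ "\n".toList ++ (PySem.Str.join "\n" (b :: t')).toList := by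
        simp [PySem.Str.join, PySem.Chars.join_cons_cons]
      have h1 := PySem.Str.len_eq (PySem.Str.join "\n" (a :: b :: t'))
      have h2 := PySem.Str.len_eq (PySem.Str.join "\n" (b :: t'))
      have h3 := PySem.Str.len_eq a
      have hlen : (PySem.Str.join "\n" (a :: b :: t')).toList.length
          = a.toList.length + 1 + (PySem.Str.join "\n" (b :: t')).toList.length := by
        rw [hj]; simp; omega
      have ihv := ih (by simp)
      rw [h2] at ihv
      simp only [List.map_cons, List.sum_cons] at ihv ⊢
      rw [h1, hlen, pvCost, h3]
      push_cast
      omega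

theorem sum_take_reverse (c : List Int) (m : Nat) (hm : m ≤ c.length) :
    (c.reverse.take m).sum = c.sum - (c.take (c.length - m)).sum := by
  have h1 : c.reverse.take m = (c.drop (c.length - m)).reverse := by
    rw [List.reverse_drop]
    congr 1
    omega
  rw [h1, List.sum_reverse]
  have := List.take_append_drop (c.length - m) c
  have hs : (c.take (c.length - m)).sum + (c.drop (c.length - m)).sum = c.sum := by
    conv_rhs => rw [← this]
    rw [List.sum_append]
  omega

-- the crux: the backward scan's removal count complements the forward scan's keep count
theorem pvCnt_reverse (c : List Int) (b : Int) (h1 : ∀ x ∈ c, 1 ≤ x)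
    (hb : 0 ≤ b) (hS : b < c.sum) :
    pvCnt (c.sum - b - 1) c.reverse = c.length - pvCnt b c - 1 := by
  set k := pvCnt b c with hk
  have hkle : k ≤ c.length := pvCnt_le_length b c
  have hple : (c.take k).sum ≤ b := pvCnt_sum_le b c hb
  have hkn : k ≠ c.length := by
    intro h
    rw [h, List.take_length] at hple
    omega
  have hklt : k < c.length := lt_of_le_of_ne hkle hkn
  have hgt : b < (c.take (k + 1)).sum := by
    rcases pvCnt_succ_gt b c with h | h
    · exact absurd h hkn
    · exact h
  apply pvCnt_eq
  · intro x hx; exact h1 x (List.mem_reverse.mp hx)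
  · simp; omega
  · rw [sum_take_reverse c (c.length - k - 1) (by omega)]
    have : c.length - (c.length - k - 1) = k + 1 := by omega
    rw [this]
    omega
  · right
    have hkk : c.length - k - 1 + 1 = c.length - k := by omega
    rw [hkk, sum_take_reverse c (c.length - k) (by omega)]
    have : c.length - (c.length - k) = k := by omega
    rw [this]
    omega

theorem pvCnt_lt_length (c : List Int) (b : Int)
    (hb : 0 ≤ b) (hS : b < c.sum) : pvCnt b c < c.length := by
  have hkle := pvCnt_le_length b c
  have hple := pvCnt_sum_le b c hb
  by_contra hcon
  have hceq : pvCnt b c = c.length := by omega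
  rw [hceq, List.take_length] at hple
  omega

-- pvCnt is unchanged by truncating the list anywhere past its value
theorem pvCnt_take (c : List Int) (b : Int) (h1 : ∀ x ∈ c, 1 ≤ x) (hb : 0 ≤ b)
    (m : Nat) (hm : pvCnt b c ≤ m) (hmn : m ≤ c.length) :
    pvCnt b (c.take m) = pvCnt b c := by
  set k := pvCnt b c with hk
  apply pvCnt_eq
  · intro x hx; exact h1 x (List.mem_of_mem_take hx)
  · simp; omega
  · rw [List.take_take]
    have : min k m = k := by omega
    rw [this]
    exact pvCnt_sum_le b c hb
  · by_cases hkm : k = m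
    · left; simp; omega
    · right
      rw [List.take_take]
      have : min (k + 1) m = k + 1 := by omega
      rw [this]
      rcases pvCnt_succ_gt b c with h | h
      · omega
      · exact h

-- ===== VERDICT (by name: the statement is the Claim_ definition above) =====
theorem limitLength_spec : Claim_equal_limitLength := by
  intro lst _
  unfold Spec_limitLength limitLength limitLength_alt
  by_cases h0 : PySem.Str.len (PySem.Str.join "\n" lst) ≤ 1024
  · simp only [if_pos h0]
  · simp only [if_neg h0]
    have hne : lst ≠ [] := by
      intro h; subst h; revert h0; decide
    have h1 : ∀ x ∈ lst.map pvCost, 1 ≤ x := by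
      intro x hx
      obtain ⟨s, _, rfl⟩ := List.mem_map.mp hx
      exact pvCost_pos s
    have hjl := join_len lst hne
    have hSsum : 1026 ≤ (lst.map pvCost).sum := by omega
    have hlen : (lst.map pvCost).length = lst.length := List.length_map ..
    -- placeholder fact
    have hp14 : pvCost "+#### others!" = 14 := by decide
    -- the appended list, sliced back, is lst
    have hsl : PySem.List.slice (lst ++ ["+#### others!"]) none (some (-1)) = lst := by
      rw [PySem.List.slice_to_neg_one, List.dropLast_concat]
    have htLen : PySem.Str.len (PySem.Str.join "\n" (lst ++ ["+#### others!"]))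
        = (lst.map pvCost).sum + 13 := by
      rw [join_len _ (by simp), List.map_append, List.sum_append]
      simp [hp14]
      omega
    set c := lst.map pvCost with hc
    set n := lst.length with hn
    set k := pvCnt 1011 c with hk
    have hklt : k < n := by
      rw [← hlen]
      exact pvCnt_lt_length c 1011 (by norm_num) (by omega)
    -- A's side: the delete loop
    have hA := pvDelLoop_eq lst.reverse ((c.sum) + 13) 0 0
    rw [List.map_reverse, ← hc] at hA
    have harg : c.sum + 13 - 0 - 1025 = c.sum - 1011 - 1 := by omega
    rw [harg, pvCnt_reverse c 1011 h1 (by norm_num) (by omega), ← hk, hlen,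
      List.length_reverse, ← hn] at hA
    have hmin : min (n - k - 1 + 1) n = n - k := by omega
    rw [hmin] at hA
    have hdropA : (lst.reverse.drop (n - k)).reverse = lst.take k := by
      have := List.reverse_drop (l := lst.reverse) (i := n - k)
      rw [List.reverse_reverse, List.length_reverse, ← hn] at this
      rw [this]
      congr 1
      omega
    rw [hdropA] at hA
    -- B's side: the keep scan
    have hworksl : PySem.List.slice lst none (some (-1)) = lst.take (n - 1) := by
      rw [PySem.List.slice_to_neg_one, List.dropLast_eq_take, ← hn]
    have hkeep : pvKeepCount (lst.take (n - 1)) (1024 - 13) 0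
        = ((k : Nat) : Int) := by
      rw [pvKeepCount_eq, List.map_take, ← hc]
      norm_num
      rw [pvCnt_take c 1011 h1 (by norm_num) (n - 1) (by omega) (by omega), ← hk]
    -- assemble
    rw [hsl, htLen, hA, hworksl, hkeep]
    have hslk : PySem.List.slice lst none (some ((k : Nat) : Int)) = lst.take k :=
      PySem.List.slice_to_natCast ..
    simp only [hslk]
    refine congrArg₂ (· ++ ·) rfl ?_
    have h2 : (0 : Int) + ((n - k : Nat) : Int) = (n : Int) - (k : Int) := by omega
    rw [h2]
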